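-- pv_equiv track=rewrite | github.com/sakanashow/paiza_python | RankC/C019.py | is_perfect_or_nearly
-- ===== SOURCE A (Python) =====
-- def is_perfect_or_nearly(num):
--     sum_divisors = sum(i for i in range(1, num) if num % i == 0) # リスト内法表記で約数の合計を計算
--     if sum_divisors == num:
--         return 'perfect'
--     elif sum_divisors == num - 1:
--         return 'nearly'
--     else:
--         return 'neither'
-- ===== SOURCE B (Python) =====
-- def is_perfect_or_nearly(num):
--     s = 0
--     i = 1
--     while i * i <= num:
--         if num % i == 0:
--             if i != num:
--                 s += i
--             j = num // i
--             if j != i and j != num: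
--                 s += j
--         i += 1
--     if s == num:
--         return 'perfect'
--     elif s == num - 1:
--         return 'nearly'
--     else:
--         return 'neither'
-- ===== Notes on version B (the rewrite author's own statement) =====
-- stated objective: faster
-- what changed: B sums proper divisors by iterating i only up to sqrt(num) and adding each divisor together with its cofactor num//i, instead of A's scan over the whole range(1,num).
import Mathlib
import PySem

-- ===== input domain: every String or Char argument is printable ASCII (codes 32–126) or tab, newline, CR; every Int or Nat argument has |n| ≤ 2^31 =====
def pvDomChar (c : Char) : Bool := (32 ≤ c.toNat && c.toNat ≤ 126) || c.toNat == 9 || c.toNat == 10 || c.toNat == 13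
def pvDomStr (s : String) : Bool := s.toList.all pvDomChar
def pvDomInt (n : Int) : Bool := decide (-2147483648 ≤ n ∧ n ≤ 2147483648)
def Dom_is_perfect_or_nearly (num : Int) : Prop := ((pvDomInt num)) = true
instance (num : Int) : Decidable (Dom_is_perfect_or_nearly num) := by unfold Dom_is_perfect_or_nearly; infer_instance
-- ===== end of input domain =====

-- B replaces A's full scan of range(1, num) by a divisor-pairing loop running only while i*i <= num.

-- ===== PORT A =====
def is_perfect_or_nearly (num : Int) : String :=
  let sum_divisors := ((PySem.List.pyRange 1 num 1).filter (fun i => PySem.Int.mod num i == 0)).sum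
  if sum_divisors = num then "perfect"
  else if sum_divisors = num - 1 then "nearly"
  else "neither"

-- ===== PORT B =====
-- the while loop of Source B: i counts up while i*i <= num, s is the running divisor sum.
-- fuel = (num + 1 - i).toNat bounds the remaining iterations (i*i ≤ num forces i ≤ num),
-- so the loop below exits on its guard, never on fuel.
def altLoop : ℕ → Int → Int → Int → Int
  | 0, _, _, s => s
  | fuel + 1, num, i, s =>
    if i * i ≤ num then
      altLoop fuel num (i + 1)
        (if PySem.Int.mod num i = 0 then
           (let s2 := if i ≠ num then s + i else s
            let j := PySem.Int.floordiv num i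
            if j ≠ i ∧ j ≠ num then s2 + j else s2)
         else s)
    else s

def is_perfect_or_nearly_alt (num : Int) : String :=
  let s := altLoop num.toNat num 1 0
  if s = num then "perfect"
  else if s = num - 1 then "nearly"
  else "neither"

-- ===== PRECONDITION & SPEC =====
def Spec_is_perfect_or_nearly (num : Int) (out : String) : Prop := out = is_perfect_or_nearly_alt num
instance (num : Int) (out : String) : Decidable (Spec_is_perfect_or_nearly num out) := by unfold Spec_is_perfect_or_nearly; infer_instance

-- ===== CLAIM (what is proved, stated in full; the proofs are below) =====
def Claim_equal_is_perfect_or_nearly : Prop := ∀ (num : Int), Dom_is_perfect_or_nearly num → Spec_is_perfect_or_nearly num (is_perfect_or_nearly num)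

-- ===== LEMMAS AND PROOFS =====

-- divisors d of n with 1 ≤ d and d*d ≤ n (the ones B's loop visits)
noncomputable def smallDivs (n : Int) : Finset Int := (Finset.Icc 1 n).filter (fun d => d ∣ n ∧ d * d ≤ n)
-- proper divisors of n (the ones A's scan adds)
noncomputable def properDivs (n : Int) : Finset Int := (Finset.Icc 1 (n - 1)).filter (fun d => d ∣ n)
-- what B's loop adds when it reaches a small divisor d
def divC (n d : Int) : Int := (if d ≠ n then d else 0) + (if n / d ≠ d ∧ n / d ≠ n then n / d else 0)

theorem aSum_eq (n : Int) (k : ℕ) :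
    ((PySem.List.pyRange 1 (1 + (k : Int)) 1).filter (fun i => PySem.Int.mod n i == 0)).sum
      = ∑ d ∈ (Finset.Icc (1:ℤ) (k : Int)).filter (· ∣ n), d := by
  induction k with
  | zero =>
    rw [Finset.Icc_eq_empty (by norm_num)]
    simp
  | succ k ih =>
    have h1 : (1 : ℤ) + ((k+1 : ℕ) : ℤ) = (1 + (k:ℤ)) + 1 := by push_cast; ring
    rw [h1, PySem.List.pyRange_one_succ_right (by omega : (1:ℤ) ≤ 1 + k),
        List.filter_append, List.sum_append, ih]
    have h2 : ((k+1:ℕ):ℤ) = (k:ℤ)+1 := by push_cast; ring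
    rw [h2]
    have hins : Finset.Icc (1:ℤ) ((k:ℤ)+1) = insert ((k:ℤ)+1) (Finset.Icc 1 (k:ℤ)) := by
      ext x; simp only [Finset.mem_Icc, Finset.mem_insert]; omega
    have hsum : ∑ d ∈ (Finset.Icc (1:ℤ) ((k:ℤ)+1)).filter (· ∣ n), d
        = (if ((k:ℤ)+1) ∣ n then (k:ℤ)+1 else 0) + ∑ d ∈ (Finset.Icc (1:ℤ) (k:ℤ)).filter (· ∣ n), d := by
      rw [Finset.sum_filter, hins, Finset.sum_insert (by simp only [Finset.mem_Icc]; omega),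
          ← Finset.sum_filter]
    rw [hsum]
    by_cases hd : ((k:ℤ)+1) ∣ n
    · have : PySem.Int.mod n (1 + (k:ℤ)) = 0 := by
        rw [show (1 + (k:ℤ)) = (k:ℤ)+1 by ring]
        exact (PySem.Int.mod_eq_zero_iff_dvd n _).mpr hd
      simp [this, if_pos hd]
      ring
    · have : ¬ PySem.Int.mod n (1 + (k:ℤ)) = 0 := by
        rw [show (1 + (k:ℤ)) = (k:ℤ)+1 by ring]
        intro h; exact hd ((PySem.Int.mod_eq_zero_iff_dvd n _).mp h)
      simp [this, if_neg hd]

theorem bLoop_eq (n : Int) (fuel : ℕ) : ∀ (i s : Int), 1 ≤ i → (n + 1 - i).toNat = fuel →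
    altLoop fuel n i s = s + ∑ d ∈ (smallDivs n).filter (fun d => i ≤ d), divC n d := by
  induction fuel with
  | zero =>
    intro i s hi hf
    have hni : n + 1 ≤ i := by omega
    rw [altLoop]
    have hempty : (smallDivs n).filter (fun d => i ≤ d) = ∅ := by
      apply Finset.filter_false_of_mem
      intro d hd
      simp only [smallDivs, Finset.mem_filter, Finset.mem_Icc] at hd
      omega
    rw [hempty]; simp
  | succ fuel ih =>
    intro i s hi hf
    rw [altLoop]
    by_cases hguard : i * i ≤ n
    · rw [if_pos hguard]
      have hin : i ≤ n := by nlinarith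
      rw [ih (i+1) _ (by omega) (by omega)]
      by_cases hdvd : i ∣ n
      · have hmod : PySem.Int.mod n i = 0 := (PySem.Int.mod_eq_zero_iff_dvd n i).mpr hdvd
        rw [if_pos hmod]
        have hfd : PySem.Int.floordiv n i = n / i := PySem.Int.floordiv_eq_ediv_of_pos (by omega)
        have hsplit : (smallDivs n).filter (fun d => i ≤ d)
            = insert i ((smallDivs n).filter (fun d => i+1 ≤ d)) := by
          ext d
          simp only [smallDivs, Finset.mem_filter, Finset.mem_Icc, Finset.mem_insert]
          constructor
          · rintro ⟨⟨⟨h1,h2⟩,h3,h4⟩,h5⟩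
            rcases eq_or_lt_of_le h5 with h|h
            · left; exact h.symm
            · right; exact ⟨⟨⟨h1,h2⟩,h3,h4⟩, by omega⟩
          · rintro (rfl|⟨⟨⟨h1,h2⟩,h3,h4⟩,h5⟩)
            · exact ⟨⟨⟨by omega, hin⟩, hdvd, hguard⟩, le_refl _⟩
            · exact ⟨⟨⟨h1,h2⟩,h3,h4⟩, by omega⟩
        rw [hsplit, Finset.sum_insert (by
          simp only [smallDivs, Finset.mem_filter, Finset.mem_Icc]
          omega)]
        simp only [divC, hfd]
        split_ifs <;> ring
      · have hmod : ¬ PySem.Int.mod n i = 0 := by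
          intro h; exact hdvd ((PySem.Int.mod_eq_zero_iff_dvd n i).mp h)
        rw [if_neg hmod]
        congr 2
        apply Finset.filter_congr
        intro d hd
        simp only [smallDivs, Finset.mem_filter, Finset.mem_Icc] at hd
        have hne : d ≠ i := by rintro rfl; exact hdvd hd.2.1
        omega
    · rw [if_neg hguard]
      have hempty : (smallDivs n).filter (fun d => i ≤ d) = ∅ := by
        apply Finset.filter_false_of_mem
        intro d hd hid
        simp only [smallDivs, Finset.mem_filter, Finset.mem_Icc] at hd
        have : i * i ≤ d * d := by nlinarith
        nlinarith [hd.2.2]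
      rw [hempty]; simp

theorem cofactor (n d : Int) (hn : 1 ≤ n) (hd1 : 1 ≤ d) (hdvd : d ∣ n) :
    d * (n / d) = n ∧ 1 ≤ n / d ∧ (n / d) ∣ n ∧ n / (n / d) = d := by
  have hd0 : d ≠ 0 := by omega
  have hmul : d * (n / d) = n := Int.mul_ediv_cancel' hdvd
  have he1 : 1 ≤ n / d := by nlinarith
  have he0 : n / d ≠ 0 := by omega
  refine ⟨hmul, he1, ⟨d, by linarith [hmul]⟩, ?_⟩
  have h2 : (n / d) * (n / (n / d)) = n := Int.mul_ediv_cancel' ⟨d, by linarith⟩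
  have h3 : (n / d) * (n / (n / d)) = (n / d) * d := by rw [h2]; linarith
  exact mul_left_cancel₀ he0 h3

theorem core (n : Int) (hn : 2 ≤ n) :
    ∑ d ∈ smallDivs n, divC n d = ∑ d ∈ properDivs n, d := by
  have hmem : ∀ d ∈ smallDivs n, 1 ≤ d ∧ d ≤ n ∧ d ∣ n ∧ d * d ≤ n := by
    intro d hd
    simp only [smallDivs, Finset.mem_filter, Finset.mem_Icc] at hd
    exact ⟨hd.1.1, hd.1.2, hd.2.1, hd.2.2⟩
  have hne_n : ∀ d ∈ smallDivs n, d ≠ n := by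
    intro d hd
    obtain ⟨h1, h2, h3, h4⟩ := hmem d hd
    rintro rfl; nlinarith
  -- split divC sum
  unfold divC
  rw [Finset.sum_add_distrib]
  have hfirst : ∑ d ∈ smallDivs n, (if d ≠ n then d else 0) = ∑ d ∈ smallDivs n, d := by
    apply Finset.sum_congr rfl
    intro d hd; rw [if_pos (hne_n d hd)]
  have hsecond : ∑ d ∈ smallDivs n, (if n / d ≠ d ∧ n / d ≠ n then n / d else 0)
      = ∑ d ∈ (smallDivs n).filter (fun d => n / d ≠ d ∧ n / d ≠ n), n / d := by
    rw [Finset.sum_filter]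
  rw [hfirst, hsecond]
  -- bijection between the filtered small divisors and the large proper divisors
  have hbij : ∑ d ∈ (smallDivs n).filter (fun d => n / d ≠ d ∧ n / d ≠ n), n / d
      = ∑ e ∈ (properDivs n).filter (fun e => ¬ e * e ≤ n), e := by
    apply Finset.sum_nbij' (i := fun d => n / d) (j := fun e => n / e)
    · intro d hd
      simp only [Finset.mem_filter] at hd
      obtain ⟨h1, h2, h3, h4⟩ := hmem d hd.1
      obtain ⟨hne_d, hne_nn⟩ := hd.2
      obtain ⟨hmul, he1, hedvd, hback⟩ := cofactor n d (by omega) h1 h3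
      simp only [properDivs, Finset.mem_filter, Finset.mem_Icc]
      have hlen : n / d ≤ n := by nlinarith
      refine ⟨⟨⟨he1, by omega⟩, hedvd⟩, ?_⟩
      intro hle
      -- (n/d)² ≤ n and d² ≤ n with d*(n/d)=n forces d = n/d
      have : d = n / d := by nlinarith
      exact hne_d this.symm
    · intro e he
      simp only [properDivs, Finset.mem_filter, Finset.mem_Icc] at he
      obtain ⟨⟨⟨he1, he2⟩, hedvd⟩, hbig⟩ := he
      obtain ⟨hmul, hd1, hddvd, hback⟩ := cofactor n e (by omega) he1 hedvd
      simp only [Finset.mem_filter, smallDivs, Finset.mem_Icc]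
      have hsm : (n / e) * (n / e) ≤ n := by nlinarith
      refine ⟨⟨⟨hd1, by nlinarith⟩, hddvd, hsm⟩, ?_, ?_⟩
      · rw [hback]; intro h; rw [← h] at hsm; exact hbig hsm
      · rw [hback]; omega
    · intro d hd
      simp only [Finset.mem_filter] at hd
      obtain ⟨h1, h2, h3, h4⟩ := hmem d hd.1
      exact (cofactor n d (by omega) h1 h3).2.2.2
    · intro e he
      simp only [properDivs, Finset.mem_filter, Finset.mem_Icc] at he
      exact (cofactor n e (by omega) he.1.1.1 he.1.2).2.2.2
    · intro d hd; rfl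
  rw [hbij]
  have hsplitP : ∑ d ∈ (properDivs n).filter (fun d => d * d ≤ n), d
      + ∑ d ∈ (properDivs n).filter (fun d => ¬ d * d ≤ n), d = ∑ d ∈ properDivs n, d :=
    Finset.sum_filter_add_sum_filter_not _ _ _
  have hPS : (properDivs n).filter (fun d => d * d ≤ n) = smallDivs n := by
    ext d
    simp only [properDivs, smallDivs, Finset.mem_filter, Finset.mem_Icc]
    constructor
    · rintro ⟨⟨⟨h1,h2⟩,h3⟩,h4⟩
      exact ⟨⟨h1, by omega⟩, h3, h4⟩
    · rintro ⟨⟨h1,h2⟩,h3,h4⟩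
      have : d ≠ n := by rintro rfl; nlinarith
      exact ⟨⟨⟨h1, by omega⟩, h3⟩, h4⟩
  rw [← hsplitP, hPS]

theorem sums_eq (n : Int) :
    ((PySem.List.pyRange 1 n 1).filter (fun i => PySem.Int.mod n i == 0)).sum = altLoop n.toNat n 1 0 := by
  rcases lt_trichotomy n 1 with h0 | h1 | h2
  · -- n ≤ 0 : both sides are 0
    rw [PySem.List.pyRange_one_eq_nil (by omega), show n.toNat = 0 by omega, altLoop]
    rfl
  · -- n = 1
    subst h1
    rw [PySem.List.pyRange_one_eq_nil (by omega)]
    norm_num [altLoop]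
  · -- n ≥ 2
    have hk : (1:ℤ) + ((n-1).toNat : ℤ) = n := by omega
    have hA := aSum_eq n (n-1).toNat
    rw [hk] at hA
    have hIcc : ((n-1).toNat : ℤ) = n - 1 := by omega
    rw [hIcc] at hA
    have hB := bLoop_eq n n.toNat 1 0 (by omega) (by omega)
    have hfilt : (smallDivs n).filter (fun d => (1:ℤ) ≤ d) = smallDivs n := by
      apply Finset.filter_true_of_mem
      intro d hd
      simp only [smallDivs, Finset.mem_filter, Finset.mem_Icc] at hd
      omega
    rw [hfilt] at hB
    rw [hA, hB, zero_add, core n (by omega)]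
    rfl

-- ===== VERDICT (by name: the statement is the Claim_ definition above) =====
theorem is_perfect_or_nearly_spec : Claim_equal_is_perfect_or_nearly := by
  intro num _
  unfold Spec_is_perfect_or_nearly is_perfect_or_nearly is_perfect_or_nearly_alt
  rw [sums_eq]
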